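-- pv_equiv track=rewrite | github.com/gchazot/aoc | year_2016/day_07.py | get_aba_in_out_brackets
-- ===== SOURCE A (Python) =====
-- def gen_aba(member):
--     for i in range(len(member) - 2):
--         sub_member = member[i:i + 3]
--         if is_aba_or_abba(sub_member):
--             yield sub_member
--
-- def get_aba_in_out_brackets(ipv7):
--     members = split_brackets(ipv7)
--     in_brackets = False
--     found_in_brackets = []
--     found_out_brackets = []
--     for member in members:
--         if in_brackets:
--             found_in_brackets += gen_aba(member)
--         else:
--             found_out_brackets += gen_aba(member)
--         in_brackets = not in_brackets
--     return found_in_brackets, found_out_brackets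
--
-- def is_aba_or_abba(chars):
--     return (len(chars) >= 3 and
--             chars[0] != chars[1] and
--             chars[0] == chars[-1] and
--             chars[1] == chars[-2])
--
-- def split_brackets(ipv7):
--     return ipv7.replace("]", "[").split("[")
-- ===== SOURCE B (Python) =====
-- def get_aba_in_out_brackets(ipv7):
--     found_in_brackets = []
--     found_out_brackets = []
--     inside = False
--     n = len(ipv7)
--     for i in range(n):
--         c = ipv7[i]
--         if c == '[' or c == ']':
--             inside = not inside
--         elif i + 2 < n:
--             c1 = ipv7[i + 1]
--             c2 = ipv7[i + 2]
--             if (c1 != '[' and c1 != ']' and c2 != '[' and c2 != ']'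
--                     and c != c1 and c == c2):
--                 triple = c + c1 + c2
--                 if inside:
--                     found_in_brackets.append(triple)
--                 else:
--                     found_out_brackets.append(triple)
--     return found_in_brackets, found_out_brackets
-- ===== Notes on version B (the rewrite author's own statement) =====
-- stated objective: alternative
-- what changed: B drops split_brackets and gen_aba entirely: instead of replacing/splitting the string into members and scanning each member, it makes one bracket-aware pass over the raw string, toggling an inside flag on every bracket character and testing each bracket-free 3-character window directly.
import Mathlib
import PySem

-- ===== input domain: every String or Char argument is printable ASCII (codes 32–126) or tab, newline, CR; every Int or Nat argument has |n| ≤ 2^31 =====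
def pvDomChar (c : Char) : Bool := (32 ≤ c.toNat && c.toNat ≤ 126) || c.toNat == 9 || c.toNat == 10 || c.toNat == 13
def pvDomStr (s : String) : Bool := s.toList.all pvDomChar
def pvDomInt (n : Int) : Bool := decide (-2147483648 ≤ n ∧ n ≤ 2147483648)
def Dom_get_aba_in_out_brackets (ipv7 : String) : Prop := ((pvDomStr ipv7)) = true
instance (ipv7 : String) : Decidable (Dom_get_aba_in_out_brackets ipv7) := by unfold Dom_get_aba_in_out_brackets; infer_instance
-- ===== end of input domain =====

-- B replaces split-then-scan-each-member with one bracket-aware pass over the raw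
-- string (objective: alternative decomposition; same return value, no side effects).

-- ===== PORT A =====
-- is_aba_or_abba(chars): the Python 'and' short-circuits, so the index accesses only
-- happen under the length guard (where pyGet? is some); comparing the Options equals
-- comparing the characters there.
def is_aba_or_abba (chars : String) : Bool :=
  decide (3 ≤ PySem.Str.len chars) &&
  (PySem.Str.pyGet? chars 0 != PySem.Str.pyGet? chars 1) &&
  (PySem.Str.pyGet? chars 0 == PySem.Str.pyGet? chars (-1)) &&
  (PySem.Str.pyGet? chars 1 == PySem.Str.pyGet? chars (-2))

def gen_aba (member : String) : List String :=
  (PySem.List.pyRange 0 (PySem.Str.len member - 2) 1).foldl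
    (fun acc i =>
      let sub_member := PySem.Str.slice member (some i) (some (i + 3))
      if is_aba_or_abba sub_member then acc ++ [sub_member] else acc) []

-- split_brackets: ipv7.replace("]", "[").split("[") — '.split' with the nonempty
-- separator "[" is PySem.Chars.splitOn on the character lists (= PySem.Str.split?'s
-- some-branch), exact here.
def split_brackets (ipv7 : String) : List String :=
  (PySem.Chars.splitOn (PySem.Str.replace ipv7 "]" "[").toList "[".toList).map String.ofList

def get_aba_in_out_brackets (ipv7 : String) : List String × List String :=
  let members := split_brackets ipv7
  let res := members.foldl
    (fun st member =>
      if st.1 then (!st.1, st.2.1 ++ gen_aba member, st.2.2)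
      else (!st.1, st.2.1, st.2.2 ++ gen_aba member))
    (false, [], [])
  (res.2.1, res.2.2)

-- ===== PORT B =====
-- B's single pass: walk the characters once, toggling `inside` on every bracket,
-- and emit the 3-char window at the current position when it contains no bracket
-- and is an ABA (c ≠ c1 ∧ c = c2).
def scanAba : List Char → Bool → List String → List String → List String × List String
  | [], _, found_in, found_out => (found_in, found_out)
  | c :: c1 :: c2 :: rest, inside, found_in, found_out =>
    if c = '[' ∨ c = ']' then scanAba (c1 :: c2 :: rest) (!inside) found_in found_out
    else if c1 ≠ '[' ∧ c1 ≠ ']' ∧ c2 ≠ '[' ∧ c2 ≠ ']' ∧ c ≠ c1 ∧ c = c2 then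
      if inside then scanAba (c1 :: c2 :: rest) inside (found_in ++ [String.ofList [c, c1, c2]]) found_out
      else scanAba (c1 :: c2 :: rest) inside found_in (found_out ++ [String.ofList [c, c1, c2]])
    else scanAba (c1 :: c2 :: rest) inside found_in found_out
  | c :: rest, inside, found_in, found_out =>
    -- fewer than 3 characters left: no window to test (i + 2 < n fails in Source B)
    if c = '[' ∨ c = ']' then scanAba rest (!inside) found_in found_out
    else scanAba rest inside found_in found_out

def get_aba_in_out_brackets_alt (ipv7 : String) : List String × List String :=
  scanAba ipv7.toList false [] []

-- ===== PRECONDITION & SPEC =====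
def Spec_get_aba_in_out_brackets (ipv7 : String) (out : List String × List String) : Prop := out = get_aba_in_out_brackets_alt ipv7
instance (ipv7 : String) (out : List String × List String) : Decidable (Spec_get_aba_in_out_brackets ipv7 out) := by unfold Spec_get_aba_in_out_brackets; infer_instance

-- ===== CLAIM (what is proved, stated in full; the proofs are below) =====
def Claim_equal_get_aba_in_out_brackets : Prop := ∀ (ipv7 : String), Dom_get_aba_in_out_brackets ipv7 → Spec_get_aba_in_out_brackets ipv7 (get_aba_in_out_brackets ipv7)

-- ===== LEMMAS AND PROOFS =====

-- proof-side vocabulary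
def isBr (c : Char) : Bool := c = '[' || c = ']'

theorem isBr_false_iff (x : Char) : isBr x = false ↔ x ≠ '[' ∧ x ≠ ']' := by
  simp [isBr]

def prependHead (p : List Char) : List (List Char) → List (List Char)
  | [] => [p]
  | h :: t => (p ++ h) :: t

-- the member list A's split produces, computed structurally on the raw characters
def segs : List Char → List (List Char)
  | [] => [[]]
  | c :: cs => if isBr c then [] :: segs cs else prependHead [c] (segs cs)

-- the ABA triples of one member, structurally
def genSpec : List Char → List (List Char)
  | a :: b :: c :: r => (if a ≠ b ∧ a = c then [[a, b, c]] else []) ++ genSpec (b :: c :: r)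
  | _ => []

-- route each member's triples into the in/out bucket, alternating
def routeAba : List (List Char) → Bool → List (List Char) × List (List Char)
  | [], _ => ([], [])
  | m :: t, b =>
    let p := routeAba t (!b)
    if b then (genSpec m ++ p.1, p.2) else (p.1, genSpec m ++ p.2)

theorem segs_ne_nil (cs : List Char) : segs cs ≠ [] := by
  cases cs with
  | nil => simp [segs]
  | cons c cs =>
    simp only [segs]
    split
    · simp
    · cases h : segs cs <;> simp [prependHead]

theorem segs_headI (cs : List Char) : (segs cs).headI = cs.takeWhile (fun c => !isBr c) := by
  induction cs with
  | nil => simp [segs]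
  | cons c cs ih =>
    cases hb : isBr c with
    | true => simp [segs, hb]
    | false =>
      obtain ⟨h, t, hs⟩ : ∃ h t, segs cs = h :: t := by
        cases hx : segs cs with
        | nil => exact absurd hx (segs_ne_nil cs)
        | cons a b => exact ⟨a, b, rfl⟩
      rw [hs] at ih
      simp only [List.headI] at ih
      simp [segs, hb, hs, prependHead, ih]

-- replace.go with a one-char pattern maps that character
theorem replace_go_eq (l : List Char) : ∀ (fuel : Nat) (acc : List Char), l.length ≤ fuel →
    PySem.Chars.replace.go [']'] ['['] fuel l acc =
      acc.reverse ++ l.map (fun c => if c = ']' then '[' else c) := by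
  induction l with
  | nil => intro fuel acc _; cases fuel <;> simp [PySem.Chars.replace.go]
  | cons c t ih =>
    intro fuel acc hf
    cases fuel with
    | zero => simp at hf
    | succ f =>
      have ht : t.length ≤ f := by simpa using hf
      simp only [PySem.Chars.replace.go]
      by_cases hc : c = ']'
      · subst hc
        rw [if_pos (by simp [List.isPrefixOf])]
        simp only [List.length_cons, List.length_nil, List.drop_succ_cons, List.drop_zero,
          List.reverse_cons, List.reverse_nil, List.nil_append]
        rw [ih f _ ht]
        simp
      · rw [if_neg (by simp [List.isPrefixOf]; exact fun h => hc h.symm)]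
        rw [ih f _ ht]
        simp [hc]

theorem replace_eq (cs : List Char) :
    PySem.Chars.replace cs [']'] ['['] = cs.map (fun c => if c = ']' then '[' else c) := by
  simp [PySem.Chars.replace, replace_go_eq cs cs.length [] le_rfl]

-- split on a single '[' is the structural splitter
def split1 : List Char → List (List Char)
  | [] => [[]]
  | c :: cs => if c = '[' then [] :: split1 cs else prependHead [c] (split1 cs)

theorem split1_ne_nil (cs : List Char) : split1 cs ≠ [] := by
  cases cs with
  | nil => simp [split1]
  | cons c cs =>
    simp only [split1]
    split
    · simp
    · cases h : split1 cs <;> simp [prependHead]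

theorem prependHead_prependHead (p q : List Char) (L : List (List Char)) (h : L ≠ []) :
    prependHead p (prependHead q L) = prependHead (p ++ q) L := by
  cases L with
  | nil => exact absurd rfl h
  | cons a b => simp [prependHead]

theorem splitOn_go_eq (l : List Char) : ∀ (fuel : Nat) (cur : List Char) (acc : List (List Char)),
    l.length ≤ fuel →
    PySem.Chars.splitOn.go ['['] fuel l cur acc =
      acc.reverse ++ prependHead cur.reverse (split1 l) := by
  induction l with
  | nil => intro fuel cur acc _; cases fuel <;> simp [PySem.Chars.splitOn.go, split1, prependHead]
  | cons c t ih =>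
    intro fuel cur acc hf
    cases fuel with
    | zero => simp at hf
    | succ f =>
      have ht : t.length ≤ f := by simpa using hf
      simp only [PySem.Chars.splitOn.go]
      by_cases hc : c = '['
      · subst hc
        rw [if_pos (by simp [List.isPrefixOf])]
        simp only [List.length_cons, List.length_nil, List.drop_succ_cons, List.drop_zero]
        rw [ih f [] (cur.reverse :: acc) ht]
        obtain ⟨a, b, hab⟩ : ∃ a b, split1 t = a :: b := by
          cases hx : split1 t with
          | nil => exact absurd hx (split1_ne_nil t)
          | cons a b => exact ⟨a, b, rfl⟩
        simp [hab, prependHead, split1]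
      · rw [if_neg (by simp [List.isPrefixOf]; exact fun h => hc h.symm)]
        rw [ih f (c :: cur) acc ht]
        simp only [split1, if_neg hc, List.reverse_cons]
        rw [prependHead_prependHead _ _ _ (split1_ne_nil t)]

theorem splitOn_eq (cs : List Char) : PySem.Chars.splitOn cs ['['] = split1 cs := by
  rw [PySem.Chars.splitOn, splitOn_go_eq cs (cs.length + 1) [] [] (by omega)]
  cases h : split1 cs with
  | nil => exact absurd h (split1_ne_nil cs)
  | cons a b => simp [prependHead]

theorem split1_map_replace (cs : List Char) :
    split1 (cs.map (fun c => if c = ']' then '[' else c)) = segs cs := by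
  induction cs with
  | nil => rfl
  | cons c cs ih =>
    simp only [List.map, split1, segs, ih]
    by_cases h1 : c = ']'
    · simp [h1, isBr]
    · by_cases h2 : c = '['
      · simp [h2, isBr]
      · simp [h1, h2, isBr]

theorem split_brackets_eq (ipv7 : String) :
    split_brackets ipv7 = (segs ipv7.toList).map String.ofList := by
  have h1 : (PySem.Str.replace ipv7 "]" "[").toList =
      PySem.Chars.replace ipv7.toList [']'] ['['] := by
    rw [PySem.Str.toList_replace]; rfl
  have h2 : ("[" : String).toList = ['['] := rfl
  rw [split_brackets, h1, h2, replace_eq, splitOn_eq, split1_map_replace]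

-- the ABA test on a window of at most 3 characters
def abaW : List Char → Bool
  | [a, b, c] => decide (a ≠ b ∧ a = c)
  | _ => false

theorem is_aba_window (w : List Char) (h : w.length ≤ 3) :
    is_aba_or_abba (String.ofList w) = abaW w := by
  match w, h with
  | [], _ =>
      simp only [is_aba_or_abba, PySem.Str.pyGet?, PySem.Str.len, String.toList_ofList]
      simp [abaW]
  | [a], _ =>
      simp only [is_aba_or_abba, PySem.Str.pyGet?, PySem.Str.len, String.toList_ofList]
      simp [abaW]
  | [a, b], _ =>
      simp only [is_aba_or_abba, PySem.Str.pyGet?, PySem.Str.len, String.toList_ofList]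
      simp [abaW]
  | [a, b, c], _ =>
      simp only [is_aba_or_abba, PySem.Str.pyGet?, PySem.Str.len, String.toList_ofList]
      have g0 : PySem.Chars.pyGet? [a, b, c] 0 = some a := rfl
      have g1 : PySem.Chars.pyGet? [a, b, c] 1 = some b := rfl
      have gm1 : PySem.Chars.pyGet? [a, b, c] (-1) = some c := rfl
      have gm2 : PySem.Chars.pyGet? [a, b, c] (-2) = some b := rfl
      rw [g0, g1, gm1, gm2]
      by_cases hab : a = b <;> by_cases hac : a = c <;>
        simp [bne, hab, hac, abaW, beq_eq_decide]
  | _ :: _ :: _ :: _ :: _, h => exact absurd h (by simp)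

theorem genSpec_short (m : List Char) (h : m.length ≤ 2) : genSpec m = [] := by
  match m, h with
  | [], _ => rfl
  | [_], _ => rfl
  | [_, _], _ => rfl

-- the filtered-window form of gen_aba, purely structural
theorem windows_pure (k : Nat) : ∀ (m : List Char), m.length = k + 3 →
    ((List.range (k + 1)).filter (fun i => abaW ((m.drop i).take 3))).map
        (fun i => String.ofList ((m.drop i).take 3)) =
      (genSpec m).map String.ofList := by
  induction k with
  | zero =>
    intro m hm
    match m, hm with
    | [a, b, c], _ =>
      have h0 : List.range 1 = [0] := rfl
      rw [h0]
      by_cases hc : a ≠ b ∧ a = c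
      · obtain ⟨hab, hac⟩ := hc
        subst hac
        simp [abaW, hab, genSpec]
      · simp only [List.filter_cons, abaW]
        rw [if_neg (by simpa using hc)]
        simp [genSpec, hc]
  | succ k ih =>
    intro m hm
    match m, hm with
    | a :: b :: c :: r, hm =>
      have hlen : (b :: c :: r).length = k + 3 := by simpa using hm
      have habaW : abaW (((a :: b :: c :: r).drop 0).take 3) = decide (a ≠ b ∧ a = c) := rfl
      have htail : (List.filter ((fun i => abaW (((a :: b :: c :: r).drop i).take 3)) ∘ Nat.succ)
            (List.range (k + 1))).map
              ((fun i => String.ofList (((a :: b :: c :: r).drop i).take 3)) ∘ Nat.succ) =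
          (genSpec (b :: c :: r)).map String.ofList := by
        simp only [Function.comp_def, List.drop_succ_cons]
        exact ih (b :: c :: r) hlen
      rw [List.range_succ_eq_map, List.filter_cons, List.filter_map, habaW]
      by_cases hc : a ≠ b ∧ a = c
      · obtain ⟨hab, hac⟩ := hc
        subst hac
        rw [if_pos (by simp only [decide_eq_true_eq]; exact ⟨hab, trivial⟩), List.map_cons,
          List.map_map, htail]
        have hg : genSpec (a :: b :: a :: r) = [a, b, a] :: genSpec (b :: a :: r) := by
          simp [genSpec, hab]
        rw [hg, List.map_cons]
        rfl
      · rw [if_neg (by simp only [decide_eq_true_eq]; exact hc), List.map_map, htail]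
        have hg : genSpec (a :: b :: c :: r) = genSpec (b :: c :: r) := by
          simp [genSpec, hc]
        rw [hg]

-- gen_aba computes genSpec
theorem gen_aba_eq (m : List Char) :
    gen_aba (String.ofList m) = (genSpec m).map String.ofList := by
  rw [gen_aba]
  simp only [PySem.Str.len, String.toList_ofList]
  by_cases hlen : m.length ≤ 2
  · have hr : PySem.List.pyRange 0 ((m.length : Int) - 2) 1 = [] := by
      simp only [PySem.List.pyRange]
      rw [if_neg (by norm_num), if_pos (by norm_num), if_neg (by omega)]
      simp
    rw [hr, genSpec_short m hlen]
    rfl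
  · obtain ⟨k, hk⟩ : ∃ k, m.length = k + 3 := ⟨m.length - 3, by omega⟩
    have hcast : (m.length : Int) - 2 = ((k + 1 : Nat) : Int) := by omega
    rw [hcast, PySem.List.pyRange_zero_natCast, List.foldl_map]
    have hslice : ∀ i : Nat,
        PySem.Str.slice (String.ofList m) (some (i : Int)) (some ((i : Int) + 3)) =
          String.ofList ((m.drop i).take 3) := by
      intro i
      have h3 : ((i : Int) + 3) = ((i + 3 : Nat) : Int) := by push_cast; ring
      rw [PySem.Str.slice, h3, String.toList_ofList, PySem.Chars.slice, PySem.List.slice_natCast]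
      have : i + 3 - i = 3 := by omega
      rw [this]
    have hfold := PySem.List.foldl_append_if
      (fun i : Nat => is_aba_or_abba (PySem.Str.slice (String.ofList m) (some (i : Int)) (some ((i : Int) + 3))))
      (fun i : Nat => PySem.Str.slice (String.ofList m) (some (i : Int)) (some ((i : Int) + 3)))
      (List.range (k + 1)) []
    rw [hfold, List.nil_append]
    have hp : ∀ i : Nat,
        is_aba_or_abba (String.ofList ((m.drop i).take 3)) = abaW ((m.drop i).take 3) :=
      fun i => is_aba_window _ (by simp)
    simp only [hslice, hp]
    exact windows_pure k m hk

-- A's alternating routing loop, in closed form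
theorem loopA (ms : List (List Char)) : ∀ (b : Bool) (fin fout : List String),
    ((ms.map String.ofList).foldl
        (fun st member =>
          if st.1 then (!st.1, st.2.1 ++ gen_aba member, st.2.2)
          else (!st.1, st.2.1, st.2.2 ++ gen_aba member))
        (b, fin, fout)).2 =
      (fin ++ ((routeAba ms b).1).map String.ofList,
       fout ++ ((routeAba ms b).2).map String.ofList) := by
  induction ms with
  | nil => intro b fin fout; simp [routeAba]
  | cons m t ih =>
    intro b fin fout
    cases b with
    | false =>
      have hstep : (if ((false, fin, fout) : Bool × List String × List String).1 = true then
            (!((false, fin, fout) : Bool × List String × List String).1,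
              ((false, fin, fout) : Bool × List String × List String).2.1 ++ gen_aba (String.ofList m),
              ((false, fin, fout) : Bool × List String × List String).2.2)
          else
            (!((false, fin, fout) : Bool × List String × List String).1,
              ((false, fin, fout) : Bool × List String × List String).2.1,
              ((false, fin, fout) : Bool × List String × List String).2.2 ++ gen_aba (String.ofList m)))
          = ((true, fin, fout ++ gen_aba (String.ofList m)) : Bool × List String × List String) := rfl
      rw [List.map_cons, List.foldl_cons, hstep, ih true fin (fout ++ gen_aba (String.ofList m))]
      simp [routeAba, gen_aba_eq, List.append_assoc]
    | true =>
      have hstep : (if ((true, fin, fout) : Bool × List String × List String).1 = true then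
            (!((true, fin, fout) : Bool × List String × List String).1,
              ((true, fin, fout) : Bool × List String × List String).2.1 ++ gen_aba (String.ofList m),
              ((true, fin, fout) : Bool × List String × List String).2.2)
          else
            (!((true, fin, fout) : Bool × List String × List String).1,
              ((true, fin, fout) : Bool × List String × List String).2.1,
              ((true, fin, fout) : Bool × List String × List String).2.2 ++ gen_aba (String.ofList m)))
          = ((false, fin ++ gen_aba (String.ofList m), fout) : Bool × List String × List String) := rfl
      rw [List.map_cons, List.foldl_cons, hstep, ih false (fin ++ gen_aba (String.ofList m)) fout]
      simp [routeAba, gen_aba_eq, List.append_assoc]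

-- B's scan equals the routed member triples
theorem scan_eq (cs : List Char) : ∀ (b : Bool) (fin fout : List String),
    scanAba cs b fin fout =
      (fin ++ ((routeAba (segs cs) b).1).map String.ofList,
       fout ++ ((routeAba (segs cs) b).2).map String.ofList) := by
  induction cs with
  | nil => intro b fin fout; cases b <;> simp [scanAba, segs, routeAba, genSpec]
  | cons c cs ih =>
    intro b fin fout
    by_cases hbr : c = '[' ∨ c = ']'
    · have hbrb : isBr c = true := by rcases hbr with h | h <;> simp [isBr, h]
      have hun : scanAba (c :: cs) b fin fout = scanAba cs (!b) fin fout := by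
        rcases cs with _ | ⟨c1, _ | ⟨c2, r⟩⟩ <;> simp [scanAba, hbr]
      have hseg : segs (c :: cs) = [] :: segs cs := by simp [segs, hbrb]
      rw [hun, ih (!b) fin fout, hseg]
      cases b <;> simp [routeAba, genSpec]
    · have hbrb : isBr c = false := by
        simp only [isBr, Bool.or_eq_false_iff, decide_eq_false_iff_not]
        exact ⟨fun h => hbr (Or.inl h), fun h => hbr (Or.inr h)⟩
      rcases cs with _ | ⟨c1, cs1⟩
      · -- cs = []: single leftover character, no window
        have hL : scanAba [c] b fin fout = (fin, fout) := by simp [scanAba, hbr]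
        have hseg : segs [c] = [[c]] := by simp [segs, hbrb, prependHead]
        rw [hL, hseg]
        cases b <;> simp [routeAba, genSpec]
      · rcases cs1 with _ | ⟨c2, r⟩
        · -- cs = [c1]: two leftover characters, no full window
          have hL : scanAba [c, c1] b fin fout = (fin, fout) := by
            by_cases h1 : c1 = '[' ∨ c1 = ']' <;> simp [scanAba, hbr, h1]
          rw [hL]
          by_cases h1 : isBr c1 = true <;>
            cases b <;> simp [segs, hbrb, h1, prependHead, routeAba, genSpec]
        · -- cs = c1 :: c2 :: r: a full 3-character window exists
          obtain ⟨h, t, hst⟩ : ∃ h t, segs (c1 :: c2 :: r) = h :: t := by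
            cases hx : segs (c1 :: c2 :: r) with
            | nil => exact absurd hx (segs_ne_nil _)
            | cons a b => exact ⟨a, b, rfl⟩
          have hh : h = (c1 :: c2 :: r).takeWhile (fun x => !isBr x) := by
            have := segs_headI (c1 :: c2 :: r)
            rw [hst] at this
            simpa using this
          have hseg : segs (c :: c1 :: c2 :: r) = (c :: h) :: t := by
            have hu : segs (c :: c1 :: c2 :: r) =
                if isBr c then [] :: segs (c1 :: c2 :: r)
                else prependHead [c] (segs (c1 :: c2 :: r)) := by rw [segs]
            rw [hu, if_neg (by simp [hbrb]), hst]
            simp [prependHead]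
          by_cases hW : c1 ≠ '[' ∧ c1 ≠ ']' ∧ c2 ≠ '[' ∧ c2 ≠ ']' ∧ c ≠ c1 ∧ c = c2
          · have hb1 : isBr c1 = false := (isBr_false_iff c1).mpr ⟨hW.1, hW.2.1⟩
            have hb2 : isBr c2 = false := (isBr_false_iff c2).mpr ⟨hW.2.2.1, hW.2.2.2.1⟩
            have hh2 : h = c1 :: c2 :: (r.takeWhile (fun x => !isBr x)) := by
              simp [hh, hb1, hb2]
            have hgen : genSpec (c :: h) = [c, c1, c2] :: genSpec h := by
              rw [hh2]
              have hu : genSpec (c :: c1 :: c2 :: (r.takeWhile (fun x => !isBr x))) =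
                  (if c ≠ c1 ∧ c = c2 then [[c, c1, c2]] else []) ++
                    genSpec (c1 :: c2 :: (r.takeWhile (fun x => !isBr x))) := by rw [genSpec]
              rw [hu, if_pos ⟨hW.2.2.2.2.1, hW.2.2.2.2.2⟩]
              rfl
            have hL : scanAba (c :: c1 :: c2 :: r) b fin fout =
                if b then scanAba (c1 :: c2 :: r) b (fin ++ [String.ofList [c, c1, c2]]) fout
                else scanAba (c1 :: c2 :: r) b fin (fout ++ [String.ofList [c, c1, c2]]) := by
              rw [scanAba, if_neg hbr, if_pos hW]
            rw [hL, hseg]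
            cases b with
            | true =>
              rw [if_pos rfl, ih true (fin ++ [String.ofList [c, c1, c2]]) fout, hst]
              simp [routeAba, hgen]
            | false =>
              rw [if_neg (by simp), ih false fin (fout ++ [String.ofList [c, c1, c2]]), hst]
              simp [routeAba, hgen]
          · have hgen : genSpec (c :: h) = genSpec h := by
              by_cases h1 : isBr c1 = true
              · have : h = [] := by simp [hh, h1]
                simp [this, genSpec]
              · rw [Bool.not_eq_true] at h1
                by_cases h2 : isBr c2 = true
                · have : h = [c1] := by simp [hh, h1, h2]
                  simp [this, genSpec]
                · rw [Bool.not_eq_true] at h2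
                  have hh2 : h = c1 :: c2 :: (r.takeWhile (fun x => !isBr x)) := by
                    simp [hh, h1, h2]
                  have hnc : ¬ (c ≠ c1 ∧ c = c2) := by
                    intro hc
                    exact hW ⟨((isBr_false_iff c1).mp h1).1, ((isBr_false_iff c1).mp h1).2,
                      ((isBr_false_iff c2).mp h2).1, ((isBr_false_iff c2).mp h2).2, hc.1, hc.2⟩
                  rw [hh2]
                  have hu : genSpec (c :: c1 :: c2 :: (r.takeWhile (fun x => !isBr x))) =
                      (if c ≠ c1 ∧ c = c2 then [[c, c1, c2]] else []) ++
                        genSpec (c1 :: c2 :: (r.takeWhile (fun x => !isBr x))) := by rw [genSpec]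
                  rw [hu, if_neg hnc]
                  rfl
            have hL : scanAba (c :: c1 :: c2 :: r) b fin fout =
                scanAba (c1 :: c2 :: r) b fin fout := by
              rw [scanAba, if_neg hbr, if_neg hW]
            rw [hL, ih b fin fout, hst, hseg]
            cases b <;> simp [routeAba, hgen]

-- ===== VERDICT (by name: the statement is the Claim_ definition above) =====
theorem get_aba_in_out_brackets_spec : Claim_equal_get_aba_in_out_brackets := by
  intro ipv7 _
  unfold Spec_get_aba_in_out_brackets
  rw [get_aba_in_out_brackets_alt, scan_eq]
  simp only [get_aba_in_out_brackets, split_brackets_eq]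
  rw [loopA]
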